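-- pv_equiv track=rewrite | github.com/sne03/Python-Data-Structure-Projects | SpellingTest.py | spelling_test
-- ===== SOURCE A (Python) =====
-- def spelling_test(s, l):
--     # total_sub_len = 0
--     # for i in l:
--     #     total_sub_len += len(i)
--     # if total_sub_len != s:
--     #     return False
--     true_l = []
--     for i in range(len(l)):
--         if l[i] in s:
--             true_l.append(l[i])
--     if my_spell_help(s, true_l, "") != None:
--         return True
--     else:
--         return False
--
-- def my_spell_help(s, l, curr_word):
--     if curr_word == s:
--         return True
--     for i in range(len(l)):
--         if (curr_word + l[i]) in s:
--             curr_str = l.pop(i)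
--             if my_spell_help(s, l, curr_word + curr_str) != None:
--                 return True
--             l.insert(i, curr_str)
-- ===== SOURCE B (Python) =====
-- def spelling_test(s, l):
--     # Zipper-style backtracking on the unmatched suffix of s: pending words still
--     # to try at this position, skipped words accumulated to restore on recursion.
--     return _spell(s, [w for w in l if w in s], [])
--
-- def _spell(suffix, pending, skipped):
--     if suffix == "":
--         return True
--     if not pending:
--         return False
--     w, rest = pending[0], pending[1:]
--     if suffix.startswith(w) and _spell(suffix[len(w):], skipped + rest, []):
--         return True
--     return _spell(suffix, rest, skipped + [w])
-- ===== Notes on version B (the rewrite author's own statement) =====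
-- stated objective: alternative
-- what changed: B is a zipper-style backtracker on the remaining unmatched suffix of s, walking a pending/skipped pair of word lists structurally with prefix matching and slicing, instead of A's index loop growing a cumulative word re-tested by substring containment of the whole of s.
import Mathlib
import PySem

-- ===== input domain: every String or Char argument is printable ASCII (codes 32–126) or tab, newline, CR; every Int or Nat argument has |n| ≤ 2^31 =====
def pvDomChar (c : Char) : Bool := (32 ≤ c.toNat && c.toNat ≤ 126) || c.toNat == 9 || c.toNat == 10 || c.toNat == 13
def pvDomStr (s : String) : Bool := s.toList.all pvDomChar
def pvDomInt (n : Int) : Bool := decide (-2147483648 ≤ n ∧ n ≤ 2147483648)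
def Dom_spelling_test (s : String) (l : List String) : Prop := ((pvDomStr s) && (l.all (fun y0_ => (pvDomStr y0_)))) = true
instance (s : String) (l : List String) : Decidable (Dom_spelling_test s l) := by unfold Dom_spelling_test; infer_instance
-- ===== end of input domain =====

-- B replaces A's growing cumulative word (re-tested by substring containment of s) with a
-- zipper-style backtracker on the remaining unmatched suffix of s: a pending/skipped pair of
-- word lists walked structurally, with prefix matching and slicing (objective: alternative).

-- ===== PORT A =====
-- my_spell_help: the pop/insert pair restores l after each failed branch, so each loop
-- iteration sees the original l and the recursive call sees l with index i removed (eraseIdx).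
def mySpellHelp (s : List Char) (l : List (List Char)) (curr : List Char) : Bool :=
  if curr = s then true
  else
    (List.range l.length).attach.any (fun ⟨i, hi⟩ =>
      let w := l[i]'(by simpa using List.mem_range.mp hi)
      if PySem.Chars.isIn (curr ++ w) s then
        mySpellHelp s (l.eraseIdx i) (curr ++ w)
      else false)
termination_by l.length
decreasing_by
  have hi' : i < l.length := by simpa using List.mem_range.mp hi
  simp only [List.length_eraseIdx, hi', if_true]
  omega

def spelling_test (s : String) (l : List String) : Bool :=
  let sl := s.toList
  let true_l := (l.map String.toList).foldl
    (fun acc w => if PySem.Chars.isIn w sl then acc ++ [w] else acc) []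
  mySpellHelp sl true_l []

-- ===== PORT B =====
-- _spell(suffix, pending, skipped): try each pending word as a prefix of the suffix,
-- recursing with the untried (skipped ++ rest) words; structural walk, no index loop.
def spellZip (suffix : List Char) (pending skipped : List (List Char)) : Bool :=
  if suffix = [] then true
  else
    match pending with
    | [] => false
    | w :: rest =>
      (PySem.Chars.startswith suffix w
          && spellZip (suffix.drop w.length) (skipped ++ rest) [])
        || spellZip suffix rest (skipped ++ [w])
termination_by (pending.length + skipped.length, pending.length)
decreasing_by
  · simp only [Prod.lex_def, List.length_append, List.length_cons, List.length_nil]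
    omega
  · simp only [Prod.lex_def, List.length_append, List.length_cons, List.length_nil]
    omega

def spelling_test_alt (s : String) (l : List String) : Bool :=
  let sl := s.toList
  spellZip sl ((l.map String.toList).filter (fun w => PySem.Chars.isIn w sl)) []

-- ===== PRECONDITION & SPEC =====
def Spec_spelling_test (s : String) (l : List String) (out : Bool) : Prop := out = spelling_test_alt s l
instance (s : String) (l : List String) (out : Bool) : Decidable (Spec_spelling_test s l out) := by unfold Spec_spelling_test; infer_instance

-- ===== CLAIM (what is proved, stated in full; the proofs are below) =====
def Claim_equal_spelling_test : Prop := ∀ (s : String) (l : List String), Dom_spelling_test s l → Spec_spelling_test s l (spelling_test s l)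

-- ===== LEMMAS AND PROOFS =====

-- Proof-side intermediary: index-based DFS on the suffix (A's loop shape, B's state shape).
def suffixAny (suffix : List Char) (avail : List (List Char)) : Bool :=
  if suffix = [] then true
  else
    (List.range avail.length).attach.any (fun ⟨i, hi⟩ =>
      let w := avail[i]'(by simpa using List.mem_range.mp hi)
      if PySem.Chars.startswith suffix w then
        suffixAny (suffix.drop w.length) (avail.take i ++ avail.drop (i + 1))
      else false)
termination_by avail.length
decreasing_by
  have hi' : i < avail.length := by simpa using List.mem_range.mp hi
  simp only [List.length_append, List.length_take, List.length_drop]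
  omega

-- Proof-side intermediary: the zipper walk of the same index loop.
def tryEach (suffix : List Char) : List (List Char) → List (List Char) → Bool
  | _, [] => false
  | skipped, w :: rest =>
    (if PySem.Chars.startswith suffix w then
        suffixAny (suffix.drop w.length) (skipped ++ rest)
      else false)
      || tryEach suffix (skipped ++ [w]) rest

-- A branch whose cumulative word is a substring of s but not a prefix can never reach curr = s.
theorem mySpellHelp_dead (s : List Char) :
    ∀ (n : ℕ) (l : List (List Char)) (curr : List Char), l.length = n →
      ¬ curr <+: s → mySpellHelp s l curr = false := by
  intro n
  induction n with
  | zero =>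
    intro l curr hl hpre
    have hne : curr ≠ s := fun h => hpre (h ▸ List.prefix_refl _)
    rw [mySpellHelp]
    simp [hne, List.length_eq_zero_iff.mp hl]
  | succ n ih =>
    intro l curr hl hpre
    have hne : curr ≠ s := fun h => hpre (h ▸ List.prefix_refl _)
    rw [mySpellHelp]
    simp only [hne, if_false]
    rw [List.any_eq_false]
    rintro ⟨i, hi⟩ -
    have hi' : i < l.length := by simpa using List.mem_range.mp hi
    simp only [Bool.not_eq_true]
    split_ifs with hin
    · apply ih
      · rw [List.length_eraseIdx, if_pos hi', hl]; omega
      · intro hp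
        exact hpre ((List.prefix_append curr _).trans hp)
    · rfl

-- Bridge 1: for a prefix curr of s, A's helper on curr equals the index DFS on the suffix.
theorem mySpellHelp_eq_suffixAny (s : List Char) :
    ∀ (n : ℕ) (l : List (List Char)) (curr : List Char), l.length = n →
      curr <+: s → mySpellHelp s l curr = suffixAny (s.drop curr.length) l := by
  intro n
  induction n with
  | zero =>
    intro l curr hl hpre
    have hl0 : l = [] := List.length_eq_zero_iff.mp hl
    rw [mySpellHelp, suffixAny]
    subst hl0
    by_cases h : curr = s
    · simp [h]
    · have hd : s.drop curr.length ≠ [] := by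
        intro hdrop
        apply h
        have hlen : s.length ≤ curr.length := by
          have := congrArg List.length hdrop
          simp only [List.length_drop, List.length_nil] at this
          omega
        rw [List.prefix_iff_eq_take.mp hpre, List.take_of_length_le hlen]
      simp [h, hd]
  | succ n ih =>
    intro l curr hl hpre
    obtain ⟨t, ht⟩ := hpre
    have hdrop : s.drop curr.length = t := by rw [← ht, List.drop_left]
    have hne_iff : (curr = s) ↔ (s.drop curr.length = []) := by
      constructor
      · intro h; subst h; simp
      · intro h; rw [hdrop] at h; subst h; simpa using ht
    rw [mySpellHelp, suffixAny]
    by_cases hcs : curr = s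
    · simp [hcs]
    · have hsne : s.drop curr.length ≠ [] := fun h => hcs (hne_iff.mpr h)
      simp only [hcs, hsne, if_false]
      congr 1
      funext ⟨i, hi⟩
      have hi' : i < l.length := by simpa using List.mem_range.mp hi
      simp only
      by_cases hsw : PySem.Chars.startswith (s.drop curr.length) (l[i]'hi') = true
      · -- w is a prefix of the suffix: both sides recurse and agree by the IH
        have hwpre : (l[i]'hi') <+: s.drop curr.length := (PySem.Chars.startswith_iff _ _).mp hsw
        have hpre' : curr ++ (l[i]'hi') <+: s := by
          rw [← ht, hdrop] at *
          exact (List.prefix_append_right_inj curr).mpr hwpre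
        have hin : PySem.Chars.isIn (curr ++ (l[i]'hi')) s = true :=
          (PySem.Chars.isIn_iff_infix _ _).mpr hpre'.isInfix
        rw [hsw, hin]
        simp only [if_true]
        rw [ih (l.eraseIdx i) _ (by rw [List.length_eraseIdx, if_pos hi', hl]; omega) hpre']
        rw [List.eraseIdx_eq_take_drop_succ]
        congr 1
        simp [List.drop_drop]
      · -- w does not match at the current position: A's branch is dead, B's is skipped
        have hnpre : ¬ (curr ++ (l[i]'hi')) <+: s := by
          intro hp
          apply hsw
          rw [← ht] at hp
          exact (PySem.Chars.startswith_iff _ _).mpr (hdrop ▸ (List.prefix_append_right_inj curr).mp hp)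
        rw [Bool.not_eq_true] at hsw
        rw [hsw]
        simp only [Bool.false_eq_true, if_false]
        split_ifs with hin
        · exact mySpellHelp_dead s _ _ _ (by rw [List.length_eraseIdx, if_pos hi']) hnpre
        · rfl

-- Any respects pointwise agreement on members.
theorem anyCongrMem {a : Type} (l : List a) (f g : a -> Bool) (h : forall x, x ∈ l -> f x = g x) :
    l.any f = l.any g := by
  induction l with
  | nil => rfl
  | cons x t ih =>
    simp only [List.any_cons, h x (by simp), ih (fun y hy => h y (by simp [hy]))]

-- Drop the attach around an any over a range.
theorem attachAny (n : Nat) (g : Nat -> Bool) :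
    (List.range n).attach.any (fun x => g x.1) = (List.range n).any g := by
  conv_rhs => rw [<- List.attach_map_subtype_val (List.range n)]
  rw [List.any_map]
  rfl

-- Bridge 2: the index-based any over avail is the zipper walk tryEach.
theorem rangeAny_eq_tryEach (suffix : List Char) :
    forall (avail skipped : List (List Char)),
      (List.range avail.length).any (fun i =>
        if PySem.Chars.startswith suffix (avail.getD i []) then
          suffixAny (suffix.drop (avail.getD i []).length)
            (skipped ++ (avail.take i ++ avail.drop (i + 1)))
        else false)
      = tryEach suffix skipped avail := by
  intro avail
  induction avail with
  | nil => intro skipped; simp [tryEach]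
  | cons w rest ih =>
    intro skipped
    rw [tryEach, List.length_cons, List.range_succ_eq_map, List.any_cons, List.any_map]
    congr 1
    rw [<- ih (skipped ++ [w])]
    apply anyCongrMem
    intro i _
    simp [Function.comp, List.append_assoc, Bool.if_false_right]

-- suffixAny itself is the zipper walk started with nothing skipped.
theorem suffixAny_eq_tryEach (suffix : List Char) (avail : List (List Char)) :
    suffixAny suffix avail = if suffix = [] then true else tryEach suffix [] avail := by
  rw [suffixAny]
  by_cases hs : suffix = []
  · simp [hs]
  · simp only [hs, if_false]
    rw [<- rangeAny_eq_tryEach suffix avail [], <- attachAny]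
    apply List.any_congr rfl
    rintro ⟨i, hi⟩
    have hi' : i < avail.length := by simpa using List.mem_range.mp hi
    simp [List.getElem?_eq_getElem hi']

-- Bridge 3: B's port equals the zipper walk of the index DFS.
theorem spellZip_eq_tryEach :
    ∀ (n : ℕ) (pending skipped : List (List Char)) (suffix : List Char),
      pending.length + skipped.length ≤ n →
      spellZip suffix pending skipped = if suffix = [] then true else tryEach suffix skipped pending := by
  intro n
  induction n with
  | zero =>
    intro pending skipped suffix hn
    have : pending = [] := List.length_eq_zero_iff.mp (by omega)
    subst this
    rw [spellZip]
    by_cases hs : suffix = [] <;> simp [hs, tryEach]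
  | succ m ih =>
    intro pending
    induction pending with
    | nil =>
      intro skipped suffix hn
      rw [spellZip]
      by_cases hs : suffix = [] <;> simp [hs, tryEach]
    | cons w rest ihp =>
      intro skipped suffix hn
      rw [spellZip]
      by_cases hs : suffix = []
      · simp [hs]
      · simp only [hs, if_false]
        rw [tryEach]
        have h1 : spellZip (suffix.drop w.length) (skipped ++ rest) [] =
            if suffix.drop w.length = [] then true else tryEach (suffix.drop w.length) [] (skipped ++ rest) := by
          apply ih
          simp only [List.length_append, List.length_nil, List.length_cons] at *
          omega
        have h2 : spellZip suffix rest (skipped ++ [w]) = tryEach suffix (skipped ++ [w]) rest := by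
          rw [ihp (skipped ++ [w]) suffix (by simp at *; omega)]
          simp [hs]
        rw [h1, h2]
        congr 1
        rw [suffixAny_eq_tryEach]
        by_cases hw : PySem.Chars.startswith suffix w <;> simp [hw]

theorem foldl_filter_eq (p : List Char → Bool) (xs : List (List Char)) :
    xs.foldl (fun acc w => if p w then acc ++ [w] else acc) [] = xs.filter p := by
  simpa using PySem.List.foldl_append_if p id xs []

-- ===== VERDICT (by name: the statement is the Claim_ definition above) =====
theorem spelling_test_spec : Claim_equal_spelling_test := by
  intro s l _
  show mySpellHelp s.toList
      ((l.map String.toList).foldl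
        (fun acc w => if PySem.Chars.isIn w s.toList then acc ++ [w] else acc) []) [] =
    spellZip s.toList ((l.map String.toList).filter (fun w => PySem.Chars.isIn w s.toList)) []
  rw [foldl_filter_eq]
  rw [mySpellHelp_eq_suffixAny s.toList _ _ [] rfl List.nil_prefix]
  rw [suffixAny_eq_tryEach]
  rw [spellZip_eq_tryEach (((l.map String.toList).filter (fun w => PySem.Chars.isIn w s.toList)).length + 0) _ _ _ (le_refl _)]
  simp
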